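-- pv_equiv track=rewrite | github.com/rknaebel/top-down-rst-parser | rstparser/dataset/merge_file.py | make_edu
-- ===== SOURCE A (Python) =====
-- def make_edu(tokens, is_starts):
--     assert len(tokens) == len(is_starts), f"{len(tokens)} -- {len(is_starts)}"
--     edu_strings = []
--     edu = []
--     for token, is_start in zip(tokens + [''], is_starts + [True]):
--         if is_start and edu:
--             edu_strings.append(' '.join(edu))
--             edu = []
--         edu.append(token)
--
--     return edu_strings
-- ===== SOURCE B (Python) =====
-- def make_edu(tokens, is_starts):
--     assert len(tokens) == len(is_starts), f"{len(tokens)} -- {len(is_starts)}"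
--     if not tokens:
--         return []
--     starts = [0] + [i for i, s in enumerate(is_starts) if i > 0 and s]
--     bounds = starts + [len(tokens)]
--     return [' '.join(tokens[a:b]) for a, b in zip(bounds, bounds[1:])]
-- ===== Notes on version B (the rewrite author's own statement) =====
-- stated objective: alternative
-- what changed: Replaces A's accumulate-and-flush loop over zip(tokens+[''], is_starts+[True]) with an index-table pass: collect the segment start indices (0 plus every later True index), append len(tokens) as final bound, then slice tokens between consecutive bounds and join each slice.
import Mathlib
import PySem

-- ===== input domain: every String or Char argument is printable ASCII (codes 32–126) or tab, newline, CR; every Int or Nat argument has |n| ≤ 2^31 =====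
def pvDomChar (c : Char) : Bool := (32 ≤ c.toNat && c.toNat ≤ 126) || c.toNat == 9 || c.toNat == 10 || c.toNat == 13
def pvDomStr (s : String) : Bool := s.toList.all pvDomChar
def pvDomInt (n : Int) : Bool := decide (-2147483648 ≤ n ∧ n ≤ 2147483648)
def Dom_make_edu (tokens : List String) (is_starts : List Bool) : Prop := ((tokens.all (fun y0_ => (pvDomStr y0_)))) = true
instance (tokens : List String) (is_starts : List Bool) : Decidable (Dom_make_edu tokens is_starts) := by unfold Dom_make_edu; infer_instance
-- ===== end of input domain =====

-- B groups tokens by an index table (segment start indices, then slice-and-join between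
-- consecutive bounds) instead of A's accumulate-and-flush loop; same O(n) cost (objective: alternative).

-- ===== PORT A =====
-- the for-loop of A: state (edu_strings, edu), iterating over zip(tokens+[''], is_starts+[True])
def makeEduLoop : List (String × Bool) → List String → List String → List String
  | [], edu_strings, _ => edu_strings
  | (token, is_start) :: rest, edu_strings, edu =>
    if is_start && !edu.isEmpty then
      makeEduLoop rest (edu_strings ++ [PySem.Str.join " " edu]) [token]
    else
      makeEduLoop rest edu_strings (edu ++ [token])

def make_edu (tokens : List String) (is_starts : List Bool) : List String :=
  makeEduLoop (List.zip (tokens ++ [""]) (is_starts ++ [true])) [] []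

-- ===== PORT B =====
def make_edu_alt (tokens : List String) (is_starts : List Bool) : List String :=
  if tokens = [] then []
  else
    let starts : List Int :=
      0 :: (((PySem.List.enumerate is_starts 0).filter (fun p => decide (0 < p.1) && p.2)).map (·.1))
    let bounds : List Int := starts ++ [(tokens.length : Int)]
    (List.zip bounds bounds.tail).map
      (fun p => PySem.Str.join " " (PySem.List.slice tokens (some p.1) (some p.2)))

-- ===== PRECONDITION & SPEC =====
-- A asserts len(tokens) == len(is_starts) and raises AssertionError otherwise.
def Pre_make_edu (tokens : List String) (is_starts : List Bool) : Prop :=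
  tokens.length = is_starts.length
instance (tokens : List String) (is_starts : List Bool) : Decidable (Pre_make_edu tokens is_starts) := by
  unfold Pre_make_edu; infer_instance
def pvWitness_make_edu : List String × List Bool := (["a", "b", "c"], [true, false, true])

def Spec_make_edu (tokens : List String) (is_starts : List Bool) (out : List String) : Prop := out = make_edu_alt tokens is_starts
instance (tokens : List String) (is_starts : List Bool) (out : List String) : Decidable (Spec_make_edu tokens is_starts out) := by unfold Spec_make_edu; infer_instance

-- ===== CLAIM (what is proved, stated in full; the proofs are below) =====
def Claim_equal_make_edu : Prop := ∀ (tokens : List String) (is_starts : List Bool), Dom_make_edu tokens is_starts → Pre_make_edu tokens is_starts → Spec_make_edu tokens is_starts (make_edu tokens is_starts)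

-- ===== LEMMAS AND PROOFS =====

-- common specification: pvGo cur zs processes the remaining (token, flag) pairs with
-- current (nonempty) group cur; a True flag closes the group, the end closes the last one.
def pvGo (cur : List String) : List (String × Bool) → List String
  | [] => [PySem.Str.join " " cur]
  | (t, true) :: rest => PySem.Str.join " " cur :: pvGo [t] rest
  | (t, false) :: rest => pvGo (cur ++ [t]) rest

-- the bounds after the leading 0: True indices of ss counted from k, then the end bound n
def pvBnds (k : Nat) (ss : List Bool) (n : Nat) : List Int :=
  (((PySem.List.enumerate ss (k : Int)).filter (·.2)).map (·.1)) ++ [(n : Int)]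

theorem makeEduLoop_acc (zs : List (String × Bool)) :
    ∀ acc edu, makeEduLoop zs acc edu = acc ++ makeEduLoop zs [] edu := by
  induction zs with
  | nil => intro acc edu; simp [makeEduLoop]
  | cons p rest ih =>
    intro acc edu
    obtain ⟨t, s⟩ := p
    by_cases h : (s && !edu.isEmpty) = true
    · simp only [makeEduLoop, if_pos h]
      rw [ih (acc ++ [PySem.Str.join " " edu]) [t], ih ([] ++ [PySem.Str.join " " edu]) [t]]
      simp
    · simp only [makeEduLoop, if_neg h]
      exact ih acc (edu ++ [t])

theorem makeEduLoop_spec (zs : List (String × Bool)) :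
    ∀ cur, cur ≠ [] →
      makeEduLoop (zs ++ [("", true)]) [] cur = pvGo cur zs := by
  induction zs with
  | nil =>
    intro cur hcur
    have : cur.isEmpty = false := by simpa [List.isEmpty_iff] using hcur
    simp [makeEduLoop, pvGo, this]
  | cons p rest ih =>
    intro cur hcur
    obtain ⟨t, s⟩ := p
    have hne : cur.isEmpty = false := by simpa [List.isEmpty_iff] using hcur
    cases s with
    | true =>
      rw [List.cons_append]
      simp only [makeEduLoop, hne, Bool.not_false, Bool.true_and, if_pos]
      rw [makeEduLoop_acc, ih [t] (by simp)]
      simp [pvGo]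
    | false =>
      rw [List.cons_append]
      simp only [makeEduLoop, Bool.false_and, Bool.false_eq_true, if_false, pvGo]
      exact ih (cur ++ [t]) (by simp)

-- slicing between consecutive bounds, generalized over an already-emitted prefix `pre`
theorem pvBnds_spec (ss : List Bool) :
    ∀ (ts pre cur : List String), cur ≠ [] → ts.length = ss.length →
      (List.zip (((pre.length : Nat) : Int) :: pvBnds (pre.length + cur.length) ss (pre.length + cur.length + ts.length))
                (pvBnds (pre.length + cur.length) ss (pre.length + cur.length + ts.length))).map
        (fun p => PySem.Str.join " " (PySem.List.slice (pre ++ cur ++ ts) (some p.1) (some p.2)))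
      = pvGo cur (List.zip ts ss) := by
  induction ss with
  | nil =>
    intro ts pre cur hcur hlen
    have hts : ts = [] := List.eq_nil_of_length_eq_zero (by simpa using hlen)
    subst hts
    simp only [pvBnds, PySem.List.enumerate_nil, List.filter_nil, List.map_nil,
      List.nil_append, List.length_nil, Nat.add_zero, List.zip_cons_cons, List.zip_nil_right,
      List.map_cons, List.map_nil, pvGo, List.append_nil]
    have : PySem.List.slice (pre ++ cur) (some ((pre.length : Nat) : Int))
        (some (((pre.length + cur.length : Nat)) : Int)) = cur := by
      rw [PySem.List.slice_natCast]
      simp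
    rw [this]
  | cons b ss' ih =>
    intro ts pre cur hcur hlen
    obtain ⟨t, ts', rfl⟩ : ∃ t ts', ts = t :: ts' := by
      cases ts with
      | nil => simp at hlen
      | cons t ts' => exact ⟨t, ts', rfl⟩
    have hlen' : ts'.length = ss'.length := by simpa using hlen
    cases b with
    | true =>
      -- bounds: pre.length+cur.length is a start; flush cur, continue with pre := pre ++ cur, cur := [t]
      have hb : pvBnds (pre.length + cur.length) (true :: ss') (pre.length + cur.length + (t :: ts').length)
          = ((pre.length + cur.length : Nat) : Int)
            :: pvBnds (pre.length + cur.length + 1) ss' (pre.length + cur.length + (t :: ts').length) := by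
        simp only [pvBnds, PySem.List.enumerate_cons, List.filter_cons]
        push_cast
        simp
      rw [hb]
      simp only [List.zip_cons_cons, List.map_cons, pvGo]
      have hsl : PySem.List.slice (pre ++ cur ++ t :: ts') (some ((pre.length : Nat) : Int))
          (some (((pre.length + cur.length : Nat)) : Int)) = cur := by
        rw [PySem.List.slice_natCast]
        simp [List.append_assoc]
      rw [hsl]
      congr 1
      · have := ih ts' (pre ++ cur) [t] (by simp) hlen'
        simp only [List.length_append, List.length_cons, List.length_nil] at this ⊢
        have harr : pre.length + cur.length + 1 + ts'.length
            = pre.length + cur.length + (ts'.length + 1) := by omega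
        rw [harr] at this
        have harr2 : pre ++ cur ++ t :: ts' = (pre ++ cur) ++ [t] ++ ts' := by simp
        rw [harr2]
        have h01 : (0 : Nat) + 1 = 1 := rfl
        simpa [Nat.add_assoc] using this
    | false =>
      -- no start here: the current group absorbs t
      have hb : pvBnds (pre.length + cur.length) (false :: ss') (pre.length + cur.length + (t :: ts').length)
          = pvBnds (pre.length + cur.length + 1) ss' (pre.length + cur.length + (t :: ts').length) := by
        simp only [pvBnds, PySem.List.enumerate_cons, List.filter_cons]
        push_cast
        simp
      rw [hb]
      simp only [List.zip_cons_cons, pvGo]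
      have := ih ts' pre (cur ++ [t]) (by simp) hlen'
      simp only [List.length_append, List.length_cons, List.length_nil] at this ⊢
      have harr : pre.length + (cur.length + 1) + ts'.length
          = pre.length + cur.length + (ts'.length + 1) := by omega
      rw [harr] at this
      have harr2 : pre ++ cur ++ t :: ts' = pre ++ (cur ++ [t]) ++ ts' := by simp
      rw [harr2]
      simpa [Nat.add_assoc] using this

-- the i > 0 test in B's filter is redundant once past index 0
theorem filter_pos_enumerate (ss : List Bool) (k : Nat) (hk : 0 < k) :
    (PySem.List.enumerate ss (k : Int)).filter (fun p => decide (0 < p.1) && p.2)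
      = (PySem.List.enumerate ss (k : Int)).filter (·.2) := by
  apply List.filter_congr
  intro p hp
  rw [PySem.List.mem_enumerate_iff] at hp
  obtain ⟨j, hj, rfl⟩ := hp
  have : (0 : Int) < (k : Int) + (j : Int) := by positivity
  simp [this]

theorem make_edu_alt_cons (t : String) (ts : List String) (s : Bool) (ss : List Bool)
    (hlen : ts.length = ss.length) :
    make_edu_alt (t :: ts) (s :: ss) = pvGo [t] (List.zip ts ss) := by
  unfold make_edu_alt
  rw [if_neg (by simp)]
  have hfilt : (PySem.List.enumerate (s :: ss) 0).filter (fun p => decide (0 < p.1) && p.2)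
      = (PySem.List.enumerate ss (1 : Int)).filter (·.2) := by
    rw [PySem.List.enumerate_cons, List.filter_cons]
    have h0 : (decide ((0:Int) < (0, s).1) && (0, s).2) = false := by simp
    rw [h0]
    have h1 : ((0 : Int) + 1) = ((1 : Nat) : Int) := by norm_num
    rw [if_neg (by simp), h1, filter_pos_enumerate ss 1 (by norm_num)]
    norm_num
  rw [hfilt]
  have := pvBnds_spec ss ts [] [t] (by simp) hlen
  simp only [List.length_nil, List.length_cons, List.length_nil, Nat.zero_add,
    List.nil_append, List.singleton_append] at this
  have hb : pvBnds 1 ss (1 + ts.length) =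
      (((PySem.List.enumerate ss (1 : Int)).filter (·.2)).map (·.1)) ++ [(((t :: ts).length : Nat) : Int)] := by
    simp only [pvBnds, List.length_cons]
    congr 1
    simp
    omega
  rw [hb] at this
  simpa [List.cons_append] using this

-- ===== VERDICT (by name: the statement is the Claim_ definition above) =====
theorem make_edu_spec : Claim_equal_make_edu := by
  intro tokens is_starts _ hpre
  unfold Spec_make_edu
  unfold Pre_make_edu at hpre
  cases tokens with
  | nil =>
    have hss : is_starts = [] := List.eq_nil_of_length_eq_zero (by simpa using hpre.symm)
    subst hss
    simp [make_edu, make_edu_alt, makeEduLoop]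
  | cons t ts =>
    cases is_starts with
    | nil => simp at hpre
    | cons s ss =>
      have hlen : ts.length = ss.length := by simpa using hpre
      rw [make_edu_alt_cons t ts s ss hlen]
      unfold make_edu
      have hz : List.zip ((t :: ts) ++ [""]) ((s :: ss) ++ [true])
          = (t, s) :: (List.zip ts ss ++ [("", true)]) := by
        simp [List.zip_append hlen]
      rw [hz]
      have hstep : makeEduLoop ((t, s) :: (List.zip ts ss ++ [("", true)])) [] []
          = makeEduLoop (List.zip ts ss ++ [("", true)]) [] [t] := by
        simp [makeEduLoop]
      rw [hstep]
      exact makeEduLoop_spec (List.zip ts ss) [t] (by simp)
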